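-- pv_equiv track=rewrite | github.com/leolech14/standard-model-of-code | context-management/tools/ai/analyze/config.py | recommend_sets
-- ===== SOURCE A (Python) =====
-- from typing import Dict, List, Optional, Any
--
-- def recommend_sets(query: str, recommendations: Dict[str, List[str]]) -> List[str]:
--     """
--     Match a query against recommendation patterns.
--
--     Uses simple pattern matching where * matches any words.
--
--     Args:
--         query: User's query string
--         recommendations: Pattern -> set list mapping
--
--     Returns:
--         List of recommended set names
--     """
--     query_lower = query.lower()
--     matches = []
--
--     for pattern, sets in recommendations.items():
--         pattern_lower = pattern.lower()
--         parts = pattern_lower.split('*')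
--
--         pos = 0
--         matched = True
--         for part in parts:
--             part = part.strip()
--             if not part:
--                 continue
--             idx = query_lower.find(part, pos)
--             if idx == -1:
--                 matched = False
--                 break
--             pos = idx + len(part)
--
--         if matched:
--             for s in sets:
--                 if s not in matches:
--                     matches.append(s)
--
--     return matches
-- ===== SOURCE B (Python) =====
-- def _matches(parts, text):
--     """Can all the parts be found in text, in order and without overlap?"""
--     if not parts:
--         return True
--     head, rest = parts[0], parts[1:]
--     for start in range(len(text) - len(head) + 1):
--         if text.startswith(head, start) and _matches(rest, text[start + len(head):]):
--             return True
--     return False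
--
--
-- def recommend_sets(query, recommendations):
--     text = query.lower()
--     picked = [s
--               for pattern, sets in recommendations.items()
--               if _matches([p for p in (piece.strip() for piece in pattern.lower().split('*'))
--                            if p],
--                           text)
--               for s in sets]
--     return list(dict.fromkeys(picked))
-- ===== Notes on version B (the rewrite author's own statement) =====
-- stated objective: alternative
-- what changed: A's greedy cursor scan (find from pos, with inline strip/continue/break per part) is replaced by a recursive backtracking wildcard matcher: parts are pre-cleaned (stripped, empties dropped) once, then matched by trying every start position with startswith and recursing on the remaining suffix; A's incremental 'if s not in matches: append' rescan is replaced by collecting all matching sets and one ordered dedup via dict.fromkeys.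
import Mathlib
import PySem

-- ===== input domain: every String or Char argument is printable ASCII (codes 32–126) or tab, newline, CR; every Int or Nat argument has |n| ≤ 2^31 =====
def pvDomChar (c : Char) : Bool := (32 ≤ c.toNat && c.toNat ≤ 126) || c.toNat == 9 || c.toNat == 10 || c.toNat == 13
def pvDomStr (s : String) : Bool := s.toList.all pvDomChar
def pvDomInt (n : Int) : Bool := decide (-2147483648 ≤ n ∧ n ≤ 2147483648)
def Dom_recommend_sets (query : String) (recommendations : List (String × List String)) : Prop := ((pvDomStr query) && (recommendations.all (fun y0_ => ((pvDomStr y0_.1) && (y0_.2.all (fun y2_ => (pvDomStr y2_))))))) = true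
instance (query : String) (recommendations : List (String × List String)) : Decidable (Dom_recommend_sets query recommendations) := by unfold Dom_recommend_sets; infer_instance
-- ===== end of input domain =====

-- B replaces A's greedy cursor/find scan with a recursive backtracking wildcard matcher over
-- pre-cleaned parts (strip, drop empties, then try every start position and recurse on the
-- remaining suffix), and A's incremental membership-scan append with a comprehension plus one
-- ordered dedup (dict.fromkeys); objective: alternative (a different algorithm of similar cost).


-- ===== PORT A =====
-- A's inner `for part in parts` loop with its cursor `pos`, `continue` on empty
-- stripped parts and `break`-returning-False on a failed find
def recommendLoopA (q : List Char) : List (List Char) → Int → Bool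
  | [], _ => true
  | part :: rest, pos =>
    let part := PySem.Chars.strip part
    if part.isEmpty then recommendLoopA q rest pos
    else
      let idx := PySem.Chars.findFrom q part pos
      if idx = -1 then false
      else recommendLoopA q rest (idx + (part.length : Int))

def recommend_sets (query : String) (recommendations : List (String × List String)) : List String :=
  let query_lower := PySem.Chars.lower query.toList
  recommendations.foldl
    (fun acc pr =>
      let pattern_lower := PySem.Chars.lower pr.1.toList
      let parts := PySem.Chars.splitOn pattern_lower ['*']
      if recommendLoopA query_lower parts 0 then
        pr.2.foldl (fun m s => if m.contains s then m else m ++ [s]) acc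
      else acc)
    []

-- ===== PORT B =====
-- `for start in range(len(text) - len(head) + 1): if text.startswith(head, start)
--    and _matches(rest, text[start + len(head):]): return True`
def matchesB : List (List Char) → List Char → Bool
  | [], _ => true
  | head :: rest, text =>
      (List.range (text.length - head.length + 1)).any fun start =>
        head.isPrefixOf (text.drop start) && matchesB rest (text.drop (start + head.length))

-- `[p for p in (piece.strip() for piece in pattern.lower().split('*')) if p]`
def cleanParts (pattern : String) : List (List Char) :=
  ((PySem.Chars.splitOn (PySem.Chars.lower pattern.toList) ['*']).map PySem.Chars.strip).filter
    (fun p => !p.isEmpty)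

def recommend_sets_alt (query : String) (recommendations : List (String × List String)) : List String :=
  let text := PySem.Chars.lower query.toList
  let picked :=
    (recommendations.filter (fun pr => matchesB (cleanParts pr.1) text)).flatMap
      (fun pr => pr.2)
  PySem.List.dedup picked

-- ===== PRECONDITION & SPEC =====
def Spec_recommend_sets (query : String) (recommendations : List (String × List String)) (out : List String) : Prop := out = recommend_sets_alt query recommendations
instance (query : String) (recommendations : List (String × List String)) (out : List String) : Decidable (Spec_recommend_sets query recommendations out) := by unfold Spec_recommend_sets; infer_instance

-- ===== CLAIM (what is proved, stated in full; the proofs are below) =====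
def Claim_equal_recommend_sets : Prop := ∀ (query : String) (recommendations : List (String × List String)), Dom_recommend_sets query recommendations → Spec_recommend_sets query recommendations (recommend_sets query recommendations)

-- ===== LEMMAS AND PROOFS =====

-- proof-layer 'the parts occur in order, disjointly, somewhere in t' matcher
-- (like matchesB but scanning the full range of start positions)
def exMatch : List (List Char) → List Char → Bool
  | [], _ => true
  | p :: rest, t =>
      (List.range (t.length + 1)).any fun i =>
        p.isPrefixOf (t.drop i) && exMatch rest (t.drop (i + p.length))

-- a match found in a suffix is a match in the whole text
lemma exMatch_drop (ps : List (List Char)) (t : List Char) (d : Nat)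
    (h : exMatch ps (t.drop d) = true) : exMatch ps t = true := by
  cases ps with
  | nil => simp [exMatch]
  | cons p rest =>
    simp only [exMatch, List.any_eq_true, List.mem_range] at h ⊢
    obtain ⟨i, hir, hcond⟩ := h
    rw [Bool.and_eq_true] at hcond
    obtain ⟨hpref, hrec⟩ := hcond
    rw [List.drop_drop] at hpref hrec
    by_cases hle : d + i ≤ t.length
    · refine ⟨d + i, by omega, ?_⟩
      rw [Bool.and_eq_true]
      constructor
      · exact hpref
      · rw [show d + i + p.length = d + (i + p.length) by omega]; exact hrec
    · refine ⟨t.length, by omega, ?_⟩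
      rw [Bool.and_eq_true]
      have h1 : t.drop t.length = t.drop (d + i) := by
        rw [List.drop_eq_nil_of_le (by omega), List.drop_eq_nil_of_le (by omega)]
      have h2 : t.drop (t.length + p.length) = t.drop (d + (i + p.length)) := by
        rw [List.drop_eq_nil_of_le (by omega), List.drop_eq_nil_of_le (by omega)]
      exact ⟨h1 ▸ hpref, h2 ▸ hrec⟩

-- B's matcher agrees with the full-range matcher when every part is non-empty:
-- a start position beyond len(text) - len(head) can never carry a prefix match
lemma matchesB_eq_exMatch (ps : List (List Char)) (hne : ∀ p ∈ ps, p ≠ []) :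
    ∀ t : List Char, matchesB ps t = exMatch ps t := by
  induction ps with
  | nil => intro t; simp [matchesB, exMatch]
  | cons p rest ih =>
    intro t
    have hrest : ∀ q ∈ rest, q ≠ [] := fun q hq => hne q (by simp [hq])
    have hp : p ≠ [] := hne p (by simp)
    have hp1 : 1 ≤ p.length := by
      rcases Nat.eq_zero_or_pos p.length with h0 | h0
      · exact absurd (List.eq_nil_of_length_eq_zero h0) hp
      · exact h0
    rw [Bool.eq_iff_iff]
    simp only [matchesB, exMatch, List.any_eq_true, List.mem_range, Bool.and_eq_true]
    constructor
    · rintro ⟨i, hi, hpref, hrec⟩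
      exact ⟨i, by omega, hpref, by rw [← ih hrest]; exact hrec⟩
    · rintro ⟨i, hi, hpref, hrec⟩
      have hlen : p.length ≤ t.length - i := by
        have := (List.isPrefixOf_iff_prefix.mp hpref).length_le
        simpa [List.length_drop] using this
      have hit : i ≤ t.length := by omega
      exact ⟨i, by omega, hpref, by rw [ih hrest]; exact hrec⟩

-- A's cursor loop from position k decides exactly the existential match of the
-- cleaned parts in the suffix q.drop k
lemma loopA_eq (q : List Char) (parts : List (List Char)) :
    ∀ (k : Nat), k ≤ q.length →
      recommendLoopA q parts (k : Int)
        = exMatch ((parts.map PySem.Chars.strip).filter (fun p => !p.isEmpty)) (q.drop k) := by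
  induction parts with
  | nil => intro k hk; simp [recommendLoopA, exMatch]
  | cons part rest ih =>
    intro k hk
    by_cases hemp : (PySem.Chars.strip part).isEmpty
    · have : ((part :: rest).map PySem.Chars.strip).filter (fun p => !p.isEmpty)
          = (rest.map PySem.Chars.strip).filter (fun p => !p.isEmpty) := by
        simp [hemp]
      rw [this, ← ih k hk]
      simp [recommendLoopA, hemp]
    · have hstr : PySem.Chars.strip part ≠ [] := by
        simpa [List.isEmpty_iff] using hemp
      have hfilter : ((part :: rest).map PySem.Chars.strip).filter (fun p => !p.isEmpty)
          = PySem.Chars.strip part :: ((rest.map PySem.Chars.strip).filter (fun p => !p.isEmpty)) := by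
        simp [hemp]
      rw [hfilter]
      by_cases hidx : PySem.Chars.findFrom q (PySem.Chars.strip part) (k : Int) = -1
      · have hnoinfix : ¬ PySem.Chars.strip part <:+: q.drop k :=
          (PySem.Chars.findFrom_natCast_eq_neg_one_iff q _ k hk).mp hidx
        have hR : exMatch (PySem.Chars.strip part
              :: ((rest.map PySem.Chars.strip).filter (fun p => !p.isEmpty))) (q.drop k) = false := by
          rw [← Bool.not_eq_true]
          simp only [exMatch, List.any_eq_true, List.mem_range, Bool.and_eq_true, not_exists]
          rintro i ⟨-, hpref, -⟩
          exact hnoinfix (((List.isPrefixOf_iff_prefix.mp hpref).isInfix).trans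
            (List.drop_suffix i (q.drop k)).isInfix)
        rw [hR]
        simp [recommendLoopA, hemp, hidx]
      · obtain ⟨hkle, hpref, hmin⟩ :=
          PySem.Chars.findFrom_natCast_spec q (PySem.Chars.strip part) k hk hidx
        have hidx0 : (0 : Int) ≤ PySem.Chars.findFrom q (PySem.Chars.strip part) (k : Int) :=
          le_trans (by exact_mod_cast Nat.zero_le k) hkle
        set n := (PySem.Chars.findFrom q (PySem.Chars.strip part) (k : Int)).toNat with hn
        have hkn : k ≤ n := by omega
        have hlen : (PySem.Chars.strip part).length ≤ q.length - n := by
          have := hpref.length_le; simpa [List.length_drop] using this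
        have hp1 : 1 ≤ (PySem.Chars.strip part).length := by
          rcases Nat.eq_zero_or_pos (PySem.Chars.strip part).length with h0 | h0
          · exact absurd (List.eq_nil_of_length_eq_zero h0) hstr
          · exact h0
        have hnp : n + (PySem.Chars.strip part).length ≤ q.length := by omega
        have hcast : PySem.Chars.findFrom q (PySem.Chars.strip part) (k : Int)
              + ((PySem.Chars.strip part).length : Int)
            = ((n + (PySem.Chars.strip part).length : Nat) : Int) := by
          push_cast
          omega
        have hA : recommendLoopA q (part :: rest) (k : Int)
            = recommendLoopA q rest (((n + (PySem.Chars.strip part).length : Nat) : Int)) := by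
          simp [recommendLoopA, hemp, hidx, hcast]
        rw [hA, ih (n + (PySem.Chars.strip part).length) hnp]
        rw [Bool.eq_iff_iff]
        simp only [exMatch, List.any_eq_true, List.mem_range, Bool.and_eq_true]
        constructor
        · intro hrec
          refine ⟨n - k, by simp [List.length_drop]; omega, ?_, ?_⟩
          · rw [List.drop_drop, show k + (n - k) = n by omega]
            exact List.isPrefixOf_iff_prefix.mpr hpref
          · rw [List.drop_drop, show k + (n - k + (PySem.Chars.strip part).length)
                = n + (PySem.Chars.strip part).length by omega]
            exact hrec
        · rintro ⟨i, hi, hpref', hrec'⟩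
          rw [List.drop_drop] at hpref' hrec'
          have hni : n ≤ k + i := by
            by_contra hcon
            exact hmin (k + i) (by omega) (by omega) (List.isPrefixOf_iff_prefix.mp hpref')
          have heq : q.drop (k + (i + (PySem.Chars.strip part).length))
              = (q.drop (n + (PySem.Chars.strip part).length)).drop (k + i - n) := by
            rw [List.drop_drop]; congr 1; omega
          rw [heq] at hrec'
          exact exMatch_drop _ _ _ hrec'

-- the two matchers agree on every pattern
lemma cond_eq (ql : List Char) (pat : String) :
    recommendLoopA ql (PySem.Chars.splitOn (PySem.Chars.lower pat.toList) ['*']) 0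
      = matchesB (cleanParts pat) ql := by
  have hA := loopA_eq ql (PySem.Chars.splitOn (PySem.Chars.lower pat.toList) ['*']) 0
    (Nat.zero_le _)
  have hne : ∀ p ∈ cleanParts pat, p ≠ [] := by
    intro p hp
    have := List.of_mem_filter hp
    simpa [List.isEmpty_iff] using this
  rw [show ((0 : Nat) : Int) = (0 : Int) by simp] at hA
  rw [hA, matchesB_eq_exMatch (cleanParts pat) hne ql]
  simp only [List.drop_zero]
  rfl

-- the guarded nested fold equals one fold over the flattened matching sets
lemma foldl_guard_flatMap (P : String × List String → Bool) :
    ∀ (recs : List (String × List String)) (acc : List String),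
      recs.foldl (fun m pr => if P pr then pr.2.foldl PySem.Set.add m else m) acc
        = List.foldl PySem.Set.add acc ((recs.filter P).flatMap (fun pr => pr.2)) := by
  intro recs
  induction recs with
  | nil => intro acc; simp
  | cons pr rest ih =>
    intro acc
    by_cases hP : P pr
    · simp only [List.foldl_cons, List.filter_cons, hP, if_true, List.flatMap_cons,
        List.foldl_append]
      exact ih _
    · simpa [List.foldl_cons, List.filter_cons, hP] using ih acc

-- ===== VERDICT (by name: the statement is the Claim_ definition above) =====
theorem recommend_sets_spec : Claim_equal_recommend_sets := by
  intro query recommendations _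
  unfold Spec_recommend_sets recommend_sets recommend_sets_alt
  set ql := PySem.Chars.lower query.toList with hql
  have hstep :
      (fun (acc : List String) (pr : String × List String) =>
        if recommendLoopA ql (PySem.Chars.splitOn (PySem.Chars.lower pr.1.toList) ['*']) 0 then
          pr.2.foldl (fun m s => if m.contains s then m else m ++ [s]) acc
        else acc)
      = (fun (m : List String) pr =>
          if matchesB (cleanParts pr.1) ql then
            pr.2.foldl PySem.Set.add m
          else m) := by
    funext m pr
    rw [cond_eq ql pr.1]
    rfl
  show List.foldl _ [] recommendations = _
  rw [hstep, foldl_guard_flatMap (fun pr => matchesB (cleanParts pr.1) ql) recommendations []]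
  rfl
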